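-- pv_equiv track=rewrite | github.com/avengerofpi/project-euler | 973/project-euler.973.py | redistribute_pile
-- ===== SOURCE A (Python) =====
-- def redistribute_pile(sizes, i):
--     """Return an iterable of sizes derived from redistributing pile at index i.
--
--     E.g., sizes=(3,2,1) and i=2 would be [(4,1,1), (3,2,1)]
--     """
--     # logDebug(f"    redistribute_pile({sizes}, {i})")
--     v = sizes[i]
--     redistributions = []
--     for j in range(len(sizes)):
--         redistribution = list(sizes)
--         if j == i:
--             continue
--
--         redistribution[j] += 1
--         if v > 1:
--             redistribution.extend([1] * (v-1))
--
--         redistribution = sorted(redistribution[:i] + redistribution[i+1:])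
--         redistribution.reverse()
--
--         # logDebug(f"      {redistribution}")
--         redistributions.append(tuple(redistribution))
--
--     return redistributions
-- ===== SOURCE B (Python) =====
-- def _bump(base, x):
--     # base is sorted descending and contains x; return base with one occurrence
--     # of x replaced by x + 1, still sorted descending, in one pass.
--     res = []
--     placed = False
--     removed = False
--     for e in base:
--         if not placed and e <= x:
--             res.append(x + 1)
--             placed = True
--         if not removed and e == x:
--             removed = True
--         else:
--             res.append(e)
--     return res
--
-- def redistribute_pile(sizes, i):
--     v = sizes[i]
--     rest = sizes[:i] + sizes[i+1:]
--     base = sorted(rest + [1] * (v - 1), reverse=True)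
--     out = []
--     for j, x in enumerate(sizes):
--         if j != i:
--             out.append(tuple(_bump(base, x)))
--     return out
-- ===== Notes on version B (the rewrite author's own statement) =====
-- stated objective: alternative
-- what changed: B removes pile i, appends the v-1 ones and sorts that base multiset descending once, then derives each row by a single linear pass that inserts sizes[j]+1 and drops one sizes[j], instead of A's building and re-sorting a fresh list for every j.
-- outside the precondition, e.g. on redistribute_pile([0, 1], -1): A returns [(1, 1, 1), (2, 0, 0)], B returns [(1, 1, 0), (2, 0, 0)]
import Mathlib
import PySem

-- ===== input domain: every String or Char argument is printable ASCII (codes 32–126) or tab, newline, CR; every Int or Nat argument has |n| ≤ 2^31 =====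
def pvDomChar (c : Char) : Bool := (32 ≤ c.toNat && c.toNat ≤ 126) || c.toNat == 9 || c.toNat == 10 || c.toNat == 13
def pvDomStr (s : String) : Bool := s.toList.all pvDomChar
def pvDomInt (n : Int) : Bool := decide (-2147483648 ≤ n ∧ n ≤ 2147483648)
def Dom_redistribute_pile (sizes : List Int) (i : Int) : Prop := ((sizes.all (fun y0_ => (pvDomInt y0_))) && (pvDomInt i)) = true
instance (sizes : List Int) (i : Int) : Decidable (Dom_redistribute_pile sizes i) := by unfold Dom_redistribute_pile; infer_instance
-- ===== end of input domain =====

-- B sorts the pile-i-removed multiset once and splices each incremented element back in a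
-- single linear pass per j, instead of re-sorting a fresh list for every j.

-- ===== PORT A =====
def redistribute_pile (sizes : List Int) (i : Int) : List (List Int) :=
  match PySem.List.pyGet? sizes i with
  | none => []   -- IndexError: excluded by Pre_
  | some v =>
    (PySem.List.pyRange 0 (PySem.List.len sizes) 1).foldl (fun redistributions j =>
      if j == i then redistributions
      else
        let r1 := PySem.List.pySetD sizes j (PySem.List.pyGetD sizes j 0 + 1)
        let r2 := if v > 1 then r1 ++ List.replicate (v - 1).toNat 1 else r1
        let r3 := PySem.List.sorted
          (PySem.List.slice r2 none (some i) ++ PySem.List.slice r2 (some (i + 1)) none)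
          (fun x => x) false
        redistributions ++ [r3.reverse]) []

-- ===== PORT B =====
-- one pass over a descending list containing x: insert x+1 at its place, drop one x
def pvBump (x : Int) : List Int → Bool → Bool → List Int
  | [], _, _ => []
  | e :: t, placed, removed =>
    let pre : List Int := if ¬placed ∧ e ≤ x then [x + 1] else []
    let placed' := placed || decide (e ≤ x)
    if ¬removed ∧ e = x then pre ++ pvBump x t placed' true
    else pre ++ e :: pvBump x t placed' removed

def redistribute_pile_alt (sizes : List Int) (i : Int) : List (List Int) :=
  match PySem.List.pyGet? sizes i with
  | none => []   -- IndexError: excluded by Pre_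
  | some v =>
    let rest := PySem.List.slice sizes none (some i) ++ PySem.List.slice sizes (some (i + 1)) none
    let base := PySem.List.sorted (rest ++ List.replicate (v - 1).toNat 1) (fun x => x) true
    (PySem.List.enumerate sizes 0).foldl (fun out jx =>
      if jx.1 ≠ i then out ++ [pvBump jx.2 base false false] else out) []

-- ===== PRECONDITION & SPEC =====
-- Pre_ excludes out-of-range i (where A raises IndexError) and negative in-range i, a corner
-- outside this helper's intended use (i is a pile index) where no behaviour is specified and
-- A's and B's slice-derived values are each defensible.
def Pre_redistribute_pile (sizes : List Int) (i : Int) : Prop :=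
  0 ≤ i ∧ i < (sizes.length : Int)
instance (sizes : List Int) (i : Int) : Decidable (Pre_redistribute_pile sizes i) := by
  unfold Pre_redistribute_pile; infer_instance

def pvWitness_redistribute_pile : List Int × Int := ([3, 2, 1], 2)

def Spec_redistribute_pile (sizes : List Int) (i : Int) (out : List (List Int)) : Prop := out = redistribute_pile_alt sizes i
instance (sizes : List Int) (i : Int) (out : List (List Int)) : Decidable (Spec_redistribute_pile sizes i out) := by unfold Spec_redistribute_pile; infer_instance

-- ===== CLAIM (what is proved, stated in full; the proofs are below) =====
def Claim_equal_redistribute_pile : Prop := ∀ (sizes : List Int) (i : Int), Dom_redistribute_pile sizes i → Pre_redistribute_pile sizes i → Spec_redistribute_pile sizes i (redistribute_pile sizes i)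

-- ===== LEMMAS AND PROOFS =====

theorem pvBump_true_true (x : Int) (l : List Int) : pvBump x l true true = l := by
  induction l with
  | nil => rfl
  | cons e t ih => simp [pvBump, ih]

theorem pvBump_spec (l : List Int) (x : Int)
    (hs : l.Pairwise (fun a b => b ≤ a)) (hm : x ∈ l) :
    (pvBump x l false false).Perm ((x + 1) :: l.erase x) ∧
      (pvBump x l false false).Pairwise (fun a b => b ≤ a) := by
  induction l with
  | nil => cases hm
  | cons e t ih =>
    rw [List.pairwise_cons] at hs
    obtain ⟨he, ht⟩ := hs
    by_cases hex : e ≤ x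
    · have hxe : e = x := by
        rcases List.mem_cons.mp hm with h | h
        · omega
        · have := he x h; omega
      subst hxe
      have hstep : pvBump e (e :: t) false false = (e + 1) :: t := by
        simp [pvBump, pvBump_true_true]
      rw [hstep]
      constructor
      · simp
      · refine List.pairwise_cons.mpr ⟨fun b hb => ?_, ht⟩
        have := he b hb; omega
    · have hxt : x ∈ t := by
        rcases List.mem_cons.mp hm with h | h
        · omega
        · exact h
      obtain ⟨ihp, ihs⟩ := ih ht hxt
      have hne : ¬ (e = x) := by omega
      have hstep : pvBump x (e :: t) false false = e :: pvBump x t false false := by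
        simp [pvBump, hex, hne]
      rw [hstep]
      constructor
      · have h1 : (e :: pvBump x t false false).Perm (e :: ((x + 1) :: t.erase x)) :=
          ihp.cons e
        have h2 : (e :: (x + 1) :: t.erase x).Perm ((x + 1) :: e :: t.erase x) :=
          List.Perm.swap _ _ _
        have h3 : (e :: t).erase x = e :: t.erase x := by
          simp [hne]
        rw [h3]
        exact h1.trans h2
      · refine List.pairwise_cons.mpr ⟨fun b hb => ?_, ihs⟩
        have hb' : b ∈ (x + 1) :: t.erase x := (ihp.mem_iff).mp hb
        rcases List.mem_cons.mp hb' with h | h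
        · omega
        · exact he b (List.erase_subset h)

-- the per-j row of A equals the per-j row of B
theorem pv_row_eq (sizes : List Int) (i v j : Int)
    (hi0 : 0 ≤ i) (hin : i < (sizes.length : Int))
    (hj0 : 0 ≤ j) (hjn : j < (sizes.length : Int)) (hne : j ≠ i)
    (hv : PySem.List.pyGet? sizes i = some v) :
    (PySem.List.sorted
      (PySem.List.slice
          (if v > 1 then
            (PySem.List.pySetD sizes j (PySem.List.pyGetD sizes j 0 + 1)) ++
              List.replicate (v - 1).toNat 1
          else PySem.List.pySetD sizes j (PySem.List.pyGetD sizes j 0 + 1)) none (some i) ++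
        PySem.List.slice
          (if v > 1 then
            (PySem.List.pySetD sizes j (PySem.List.pyGetD sizes j 0 + 1)) ++
              List.replicate (v - 1).toNat 1
          else PySem.List.pySetD sizes j (PySem.List.pyGetD sizes j 0 + 1)) (some (i + 1)) none)
      (fun x => x) false).reverse
    = pvBump (PySem.List.pyGetD sizes j 0)
        (PySem.List.sorted
          ((PySem.List.slice sizes none (some i) ++ PySem.List.slice sizes (some (i + 1)) none) ++
            List.replicate (v - 1).toNat 1)
          (fun x => x) true) false false := by
  have hkn : i.toNat < sizes.length := by omega
  have hjn' : j.toNat < sizes.length := by omega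
  have hkj : j.toNat ≠ i.toNat := by omega
  set k := i.toNat with hk
  set jn := j.toNat with hjnn
  set x := sizes[jn]'hjn' with hx
  -- v is the element at index i
  have hvk : sizes[k]'hkn = v := by
    rw [PySem.List.pyGet?_of_nonneg sizes hi0] at hv
    rw [List.getElem?_eq_getElem hkn] at hv
    exact Option.some.inj hv
  -- the value read at j
  have hgd : PySem.List.pyGetD sizes j 0 = x := by
    rw [PySem.List.pyGetD_of_nonneg sizes 0 hj0, List.getD_eq_getElem?_getD,
      List.getElem?_eq_getElem hjn']
    rfl
  set E := List.replicate (v - 1).toNat (1 : Int) with hE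
  set r1 := sizes.set jn (x + 1) with hr1
  have hset : PySem.List.pySetD sizes j (PySem.List.pyGetD sizes j 0 + 1) = r1 := by
    rw [hgd, PySem.List.pySetD_of_nonneg sizes _ hj0]
  have hr1len : r1.length = sizes.length := by simp [hr1]
  -- collapse the conditional: the replicate list is empty when v ≤ 1
  have hcond : (if v > 1 then r1 ++ E else r1) = r1 ++ E := by
    split_ifs with h
    · rfl
    · have : (v - 1).toNat = 0 := by omega
      simp [hE, this]
  -- A's multiset
  have hsliceA :
      PySem.List.slice (r1 ++ E) none (some i) ++ PySem.List.slice (r1 ++ E) (some (i + 1)) none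
        = r1.eraseIdx k ++ E := by
    rw [PySem.List.slice_to _ hi0, PySem.List.slice_from _ (by omega : (0:Int) ≤ i + 1)]
    have h1 : List.take i.toNat (r1 ++ E) = r1.take k := by
      rw [List.take_append_of_le_length (by omega)]
    have h2 : List.drop (i + 1).toNat (r1 ++ E) = r1.drop (k + 1) ++ E := by
      have : (i + 1).toNat = k + 1 := by omega
      rw [this, List.drop_append_of_le_length (by omega)]
    rw [h1, h2, List.eraseIdx_eq_take_drop_succ, List.append_assoc]
  set rest := sizes.eraseIdx k with hrest
  have hsliceB :
      PySem.List.slice sizes none (some i) ++ PySem.List.slice sizes (some (i + 1)) none = rest := by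
    rw [PySem.List.slice_to _ hi0, PySem.List.slice_from _ (by omega : (0:Int) ≤ i + 1)]
    have : (i + 1).toNat = k + 1 := by omega
    rw [this, hrest, List.eraseIdx_eq_take_drop_succ]
  -- x occurs in rest
  have hx_mem : x ∈ rest := by
    rw [hrest, List.eraseIdx_eq_take_drop_succ]
    rcases Nat.lt_or_ge jn k with h | h
    · refine List.mem_append_left _ ?_
      refine List.mem_iff_getElem.mpr ⟨jn, by simp; omega, ?_⟩
      simp [hx]
    · have h' : k < jn := by omega
      refine List.mem_append_right _ ?_
      refine List.mem_iff_getElem.mpr ⟨jn - (k + 1), by simp; omega, ?_⟩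
      rw [List.getElem_drop]
      simp only [hx]
      congr 1
      omega
  -- permutation bookkeeping
  have perm1 : r1.Perm (v :: r1.eraseIdx k) := by
    have h0 := (List.getElem_cons_eraseIdx_perm (l := r1) (n := k) (by omega)).symm
    have hgetr : r1[k]'(by omega) = v := by
      simp only [hr1]
      rw [List.getElem_set_ne (by omega)]
      exact hvk
    rwa [hgetr] at h0
  have perm2 : r1.Perm ((x + 1) :: sizes.eraseIdx jn) :=
    List.set_perm_cons_eraseIdx hjn' (x + 1)
  have perm3 : sizes.Perm (x :: sizes.eraseIdx jn) := by
    simpa [hx] using (List.getElem_cons_eraseIdx_perm hjn').symm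
  have perm4 : sizes.Perm (v :: rest) := by
    simpa [hvk, hrest] using (List.getElem_cons_eraseIdx_perm hkn).symm
  have perm5 : rest.Perm (x :: rest.erase x) := List.perm_cons_erase hx_mem
  have hEI : (sizes.eraseIdx jn).Perm (v :: rest.erase x) := by
    have h1 : (x :: sizes.eraseIdx jn).Perm (x :: v :: rest.erase x) :=
      (perm3.symm.trans ((perm4.trans (perm5.cons v)).trans (List.Perm.swap _ _ _)))
    exact h1.cons_inv
  have hM : (r1.eraseIdx k).Perm ((x + 1) :: rest.erase x) := by
    have h1 : (v :: r1.eraseIdx k).Perm (v :: (x + 1) :: rest.erase x) :=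
      (perm1.symm.trans ((perm2.trans (hEI.cons (x + 1))).trans (List.Perm.swap _ _ _)))
    exact h1.cons_inv
  -- the two rows
  set base := PySem.List.sorted (rest ++ E) (fun y : Int => y) true with hbase
  have hbase_pair : base.Pairwise (fun a b => b ≤ a) :=
    PySem.List.sorted_pairwise_rev (rest ++ E) (fun y : Int => y)
  have hx_base : x ∈ base := by
    rw [hbase, PySem.List.mem_sorted]
    exact List.mem_append_left _ hx_mem
  obtain ⟨hBperm, hBpair⟩ := pvBump_spec base x hbase_pair hx_base
  have hbase_erase : (base.erase x).Perm (rest.erase x ++ E) := by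
    have h1 : (base.erase x).Perm ((rest ++ E).erase x) :=
      List.Perm.erase x (PySem.List.sorted_perm (rest ++ E) _ true)
    rwa [List.erase_append_left E hx_mem] at h1
  have hB_perm_lj : (pvBump x base false false).Perm (r1.eraseIdx k ++ E) := by
    have h1 : (pvBump x base false false).Perm ((x + 1) :: (rest.erase x ++ E)) :=
      hBperm.trans (hbase_erase.cons (x + 1))
    have h2 : (((x + 1) :: rest.erase x) ++ E).Perm (r1.eraseIdx k ++ E) :=
      (hM.append_right E).symm
    exact h1.trans h2
  set lj := r1.eraseIdx k ++ E with hlj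
  set rowA := (PySem.List.sorted lj (fun y : Int => y) false).reverse with hrowA
  have hA_perm : rowA.Perm lj :=
    (List.reverse_perm _).trans (PySem.List.sorted_perm lj _ false)
  have hA_pair : rowA.Pairwise (fun a b => b ≤ a) := by
    rw [hrowA, List.pairwise_reverse]
    exact PySem.List.sorted_pairwise lj (fun y : Int => y)
  -- both rows are the unique descending arrangement of the same multiset
  have hfinal : rowA = pvBump x base false false := by
    haveI : Std.Antisymm (fun a b : Int => b ≤ a) := ⟨fun a b h1 h2 => le_antisymm h2 h1⟩
    exact List.Perm.eq_of_pairwise' hA_pair hBpair (hA_perm.trans hB_perm_lj.symm)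
  rw [hset, hcond, hsliceA, hsliceB, hgd]
  exact hfinal

-- ===== VERDICT (by name: the statement is the Claim_ definition above) =====
theorem redistribute_pile_spec : Claim_equal_redistribute_pile := by
  intro sizes i _hdom hpre
  obtain ⟨hi0, hin⟩ := hpre
  unfold Spec_redistribute_pile
  have hkn : i.toNat < sizes.length := by omega
  have hv : PySem.List.pyGet? sizes i = some (sizes[i.toNat]'hkn) := by
    rw [PySem.List.pyGet?_of_nonneg sizes hi0, List.getElem?_eq_getElem hkn]
  set v := sizes[i.toNat]'hkn with hvdef
  unfold redistribute_pile redistribute_pile_alt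
  rw [hv]
  simp only
  rw [PySem.List.enumerate_eq_map_pyRange sizes 0, List.foldl_map]
  have hlen : PySem.List.len sizes = (sizes.length : Int) := by
    simp [PySem.List.len]
  rw [hlen]
  apply PySem.List.foldl_congr_mem
  intro acc j hj
  rw [PySem.List.mem_pyRange_one] at hj
  by_cases hji : j = i
  · simp [hji]
  · have hrow := pv_row_eq sizes i v j hi0 hin hj.1 hj.2 hji hv
    simp only [beq_iff_eq, hji, if_neg, ne_eq, not_false_eq_true, if_pos]
    rw [hrow]
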